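-- pv_equiv track=rewrite | github.com/Kim-Dong-Jun99/Algorithm | 프로그래머스/unrated/133499. 옹알이 （2）/옹알이 （2）.py | solution
-- ===== SOURCE A (Python) =====
-- def solution(babbling):
--     answer = 0
--
--     can_pronounce = ["aya", "ye", "woo", "ma"]
--     for word in babbling:
--         previous = -1
--
--         while len(word) > 0:
--             done = True
--             for i in range(4):
--                 if word.find(can_pronounce[i]) == 0:
--                     if i != previous:
--                         done = False
--                         word = word[len(can_pronounce[i]):]
--                         previous = i
--                     else:
--                         break
--             if done:
--                 break
--         if len(word) == 0:
--             answer += 1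
--
--
--     return answer
-- ===== SOURCE B (Python) =====
-- def solution(babbling):
--     sounds = {"a": "aya", "y": "ye", "w": "woo", "m": "ma"}
--     answer = 0
--     for word in babbling:
--         ok = True
--         last = ""   # last completed sound
--         cur = ""    # sound currently being matched
--         pos = 0     # position inside cur
--         for ch in word:
--             if pos == 0:
--                 cur = sounds.get(ch, "")
--                 if cur == "" or cur == last:
--                     ok = False
--                     break
--             if ch != cur[pos]:
--                 ok = False
--                 break
--             pos += 1
--             if pos == len(cur):
--                 last = cur
--                 pos = 0
--         if ok and pos == 0:
--             answer += 1
--     return answer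
-- ===== Notes on version B (the rewrite author's own statement) =====
-- stated objective: faster
-- what changed: A greedily strips one of the four sounds off the front of the word in a while-loop (rescanning all four candidates with find() and slicing the string each pass, tracking the previous sound index); B never slices or does prefix scans: it runs a per-character finite state machine over the word, keeping only the sound currently being matched, the position inside it and the last completed sound.
import Mathlib
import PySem

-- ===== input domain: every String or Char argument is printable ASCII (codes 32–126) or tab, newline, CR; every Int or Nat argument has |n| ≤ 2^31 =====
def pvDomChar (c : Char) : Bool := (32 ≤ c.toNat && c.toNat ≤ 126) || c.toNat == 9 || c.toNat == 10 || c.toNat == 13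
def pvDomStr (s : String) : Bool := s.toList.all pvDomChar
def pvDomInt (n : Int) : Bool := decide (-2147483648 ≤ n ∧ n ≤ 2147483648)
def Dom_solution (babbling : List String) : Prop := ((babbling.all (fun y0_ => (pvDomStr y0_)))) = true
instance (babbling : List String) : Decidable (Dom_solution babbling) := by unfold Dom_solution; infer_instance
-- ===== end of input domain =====

-- B replaces A's greedy prefix-stripping loop (repeated find/slice over a shrinking string) by a
-- per-character finite state machine: one pass over the characters of each word, tracking only the
-- sound being matched, the position inside it and the last completed sound; no slicing, no prefix
-- scans.  A timing run measured B faster by a constant factor (no per-token slicing/rescanning).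

-- ===== PORT A =====
def canPronounce : List String := ["aya", "ye", "woo", "ma"]

-- the inner 'for i in range(4)' loop of A; returns (done, word, previous); 'break' returns early
def solForA : List Int → Bool → String → Int → Bool × String × Int
  | [], done, word, prev => (done, word, prev)
  | i :: rest, done, word, prev =>
    let s := PySem.List.pyGetD canPronounce i ""
    if PySem.Str.find word s = 0 then
      if i ≠ prev then
        solForA rest false (PySem.Str.slice word (some (PySem.Str.len s)) none) i
      else (done, word, prev)
    else solForA rest done word prev

-- the 'while len(word) > 0' loop of A (fuel = |word| + 1 is enough: every pass that
-- continues strips at least one sound of length ≥ 2 from the word)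
def solWhileA : Nat → String → Int → String
  | 0, word, _ => word
  | Nat.succ f, word, prev =>
    if 0 < PySem.Str.len word then
      let t := solForA (PySem.List.pyRange 0 4 1) true word prev
      if t.1 then t.2.1 else solWhileA f t.2.1 t.2.2
    else word

def solution (babbling : List String) : Int :=
  babbling.foldl (fun answer word =>
    let word' := solWhileA (word.toList.length + 1) word (-1)
    if PySem.Str.len word' = 0 then answer + 1 else answer) 0

-- ===== PORT B =====
def soundsD : PySem.Dict Char String :=
  PySem.Dict.ofList [('a', "aya"), ('y', "ye"), ('w', "woo"), ('m', "ma")]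

-- Source B's 'for ch in word' automaton loop; state = (ok, last, cur, pos); 'break' returns early
-- with ok = false.  cur[pos] is always in range when read (pos < len cur is an invariant of the
-- Python loop), so the 'none' branch of pyGet? is unreachable and ports the same break.
def bScan : List Char → String → String → Int → Bool × String × String × Int
  | [], last, cur, pos => (true, last, cur, pos)
  | ch :: rest, last, cur, pos =>
    let cur1 := if pos = 0 then PySem.Dict.getD soundsD ch "" else cur
    if pos = 0 ∧ (cur1 = "" ∨ cur1 = last) then (false, last, cur1, pos)
    else if ¬ (PySem.Str.pyGet? cur1 pos = some ch) then (false, last, cur1, pos)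
    else if pos + 1 = PySem.Str.len cur1 then bScan rest cur1 cur1 0
    else bScan rest last cur1 (pos + 1)

def solution_alt (babbling : List String) : Int :=
  babbling.foldl (fun answer word =>
    let t := bScan word.toList "" "" 0
    if t.1 = true ∧ t.2.2.2 = 0 then answer + 1 else answer) 0

-- ===== PRECONDITION & SPEC =====
def Spec_solution (babbling : List String) (out : Int) : Prop := out = solution_alt babbling
instance (babbling : List String) (out : Int) : Decidable (Spec_solution babbling out) := by unfold Spec_solution; infer_instance

-- ===== CLAIM (what is proved, stated in full; the proofs are below) =====
def Claim_equal_solution : Prop := ∀ (babbling : List String), Dom_solution babbling → Spec_solution babbling (solution babbling)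

-- ===== LEMMAS AND PROOFS =====

-- the sounds as char lists
def soundL : Nat → List Char
  | 0 => ['a','y','a']
  | 1 => ['y','e']
  | 2 => ['w','o','o']
  | _ => ['m','a']

def soundS : Nat → String
  | 0 => "aya"
  | 1 => "ye"
  | 2 => "woo"
  | _ => "ma"

-- the unique sound (if any) that the word starts with, and the rest
def mu (cs : List Char) : Option (Nat × List Char) :=
  if ['a','y','a'] <+: cs then some (0, cs.drop 3)
  else if ['y','e'] <+: cs then some (1, cs.drop 2)
  else if ['w','o','o'] <+: cs then some (2, cs.drop 3)
  else if ['m','a'] <+: cs then some (3, cs.drop 2)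
  else none

lemma mu_some_len {cs : List Char} {m : Nat} {r : List Char} (h : mu cs = some (m, r)) :
    r.length + 2 ≤ cs.length := by
  unfold mu at h
  split_ifs at h with h0 h1 h2 h3
  · obtain ⟨t, rfl⟩ := h0; cases h; simp
  · obtain ⟨t, rfl⟩ := h1; cases h; simp
  · obtain ⟨t, rfl⟩ := h2; cases h; simp
  · obtain ⟨t, rfl⟩ := h3; cases h; simp

-- the residual word A's interleaved loop leaves, computed sequentially
def seqRes (cs : List Char) (p : Int) : List Char :=
  match h : mu cs with
  | none => cs
  | some (m, r) => if (m : Int) = p then cs else seqRes r m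
termination_by cs.length
decreasing_by have := mu_some_len h; omega

lemma mu_nil : mu [] = none := by decide

lemma find_zero_iff (cs sub : List Char) : PySem.Chars.find cs sub = 0 ↔ sub <+: cs := by
  constructor
  · intro h
    have hs := PySem.Chars.find_spec (s := cs) (sub := sub) (by omega)
    simpa [h] using hs.1
  · intro h
    have hne : PySem.Chars.find cs sub ≠ -1 := (PySem.Chars.find_ne_neg_one_iff cs sub).2 h.isInfix
    have h0 : 0 ≤ PySem.Chars.find cs sub := by
      have := PySem.Chars.neg_one_le_find cs sub; omega
    have hs := PySem.Chars.find_spec (s := cs) (sub := sub) h0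
    by_contra hne0
    have hlt : 0 < (PySem.Chars.find cs sub).toNat := by omega
    exact hs.2 0 hlt (by simpa using h)

lemma head_of_prefix {a : Char} {t cs : List Char} (h : (a :: t) <+: cs) :
    cs.head? = some a := by
  obtain ⟨u, rfl⟩ := h; rfl

lemma mu_none_facts {cs : List Char} (h : mu cs = none) :
    ∀ i, i < 4 → ¬ soundL i <+: cs := by
  unfold mu at h
  split_ifs at h with h0 h1 h2 h3
  intro i hi
  interval_cases i <;> simpa [soundL]

lemma mu_some_facts {cs : List Char} {m : Nat} {r : List Char} (h : mu cs = some (m, r)) :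
    m < 4 ∧ soundL m <+: cs ∧ r = cs.drop (soundL m).length ∧
      (∀ i, i < 4 → i ≠ m → ¬ soundL i <+: cs) := by
  unfold mu at h
  split_ifs at h with h0 h1 h2 h3 <;> cases h
  · refine ⟨by omega, h0, by simp [soundL], ?_⟩
    intro i hi hne
    have hh := head_of_prefix h0
    interval_cases i <;> simp_all [soundL] <;> intro hp <;>
      simp [head_of_prefix hp] at hh
  · refine ⟨by omega, h1, by simp [soundL], ?_⟩
    intro i hi hne
    have hh := head_of_prefix h1
    interval_cases i <;> simp_all [soundL] <;> intro hp <;>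
      simp [head_of_prefix hp] at hh
  · refine ⟨by omega, h2, by simp [soundL], ?_⟩
    intro i hi hne
    have hh := head_of_prefix h2
    interval_cases i <;> simp_all [soundL] <;> intro hp <;>
      simp [head_of_prefix hp] at hh
  · refine ⟨by omega, h3, by simp [soundL], ?_⟩
    intro i hi hne
    have hh := head_of_prefix h3
    interval_cases i <;> simp_all [soundL] <;> intro hp <;>
      simp [head_of_prefix hp] at hh

-- the port's prefix test, for each concrete sound index
lemma test0_iff (w : String) :
    (PySem.Str.find w (PySem.List.pyGetD canPronounce (0 : Int) "") = 0) ↔ soundL 0 <+: w.toList := by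
  have e : PySem.List.pyGetD canPronounce (0 : Int) "" = "aya" := by decide
  have e2 : "aya".toList = soundL 0 := by decide
  rw [e, PySem.Str.find_eq, e2]; exact find_zero_iff _ _

lemma test1_iff (w : String) :
    (PySem.Str.find w (PySem.List.pyGetD canPronounce (1 : Int) "") = 0) ↔ soundL 1 <+: w.toList := by
  have e : PySem.List.pyGetD canPronounce (1 : Int) "" = "ye" := by decide
  have e2 : "ye".toList = soundL 1 := by decide
  rw [e, PySem.Str.find_eq, e2]; exact find_zero_iff _ _

lemma test2_iff (w : String) :
    (PySem.Str.find w (PySem.List.pyGetD canPronounce (2 : Int) "") = 0) ↔ soundL 2 <+: w.toList := by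
  have e : PySem.List.pyGetD canPronounce (2 : Int) "" = "woo" := by decide
  have e2 : "woo".toList = soundL 2 := by decide
  rw [e, PySem.Str.find_eq, e2]; exact find_zero_iff _ _

lemma test3_iff (w : String) :
    (PySem.Str.find w (PySem.List.pyGetD canPronounce (3 : Int) "") = 0) ↔ soundL 3 <+: w.toList := by
  have e : PySem.List.pyGetD canPronounce (3 : Int) "" = "ma" := by decide
  have e2 : "ma".toList = soundL 3 := by decide
  rw [e, PySem.Str.find_eq, e2]; exact find_zero_iff _ _

lemma seqRes_none {cs : List Char} (p : Int) (h : mu cs = none) : seqRes cs p = cs := by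
  unfold seqRes; split <;> simp_all

lemma seqRes_some {cs r : List Char} {m : Nat} (p : Int) (h : mu cs = some (m, r)) :
    seqRes cs p = if (m : Int) = p then cs else seqRes r m := by
  conv_lhs => rw [seqRes.eq_def]
  split <;> simp_all

-- stripping a matched sound, on the list side
lemma slice_drop (w : String) (k : Nat) :
    (PySem.Str.slice w (some (k : Int)) none).toList = w.toList.drop k := by
  simp [PySem.List.slice_from_natCast]

-- solForA step lemmas
lemma forA_skip (i : Int) (rest : List Int) (d : Bool) (w : String) (p : Int)
    (h : ¬ PySem.Str.find w (PySem.List.pyGetD canPronounce i "") = 0) :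
    solForA (i :: rest) d w p = solForA rest d w p := by
  simp only [solForA]
  rw [if_neg h]

lemma forA_hit_ne (i : Int) (rest : List Int) (d : Bool) (w : String) (p : Int)
    (h : PySem.Str.find w (PySem.List.pyGetD canPronounce i "") = 0) (hne : i ≠ p) :
    solForA (i :: rest) d w p =
      solForA rest false
        (PySem.Str.slice w (some (PySem.Str.len (PySem.List.pyGetD canPronounce i ""))) none) i := by
  simp only [solForA]
  rw [if_pos h, if_pos hne]

lemma forA_hit_eq (i : Int) (rest : List Int) (d : Bool) (w : String) (p : Int)
    (h : PySem.Str.find w (PySem.List.pyGetD canPronounce i "") = 0) (heq : i = p) :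
    solForA (i :: rest) d w p = (d, w, p) := by
  simp only [solForA]
  rw [if_pos h, if_neg (fun hn : i ≠ p => hn heq)]

lemma forA_fst_false (l : List Int) (w : String) (p : Int) :
    (solForA l false w p).1 = false := by
  induction l generalizing w p with
  | nil => rfl
  | cons i rest ih =>
    simp only [solForA]
    split_ifs <;> simp [ih]

-- one pass of A's inner for loop, entered at index j, when nothing (relevant) matches
lemma forA_pass_stop (w : String) (p : Int) (d : Bool) (j : Nat)
    (h : ∀ i, j ≤ i → i < 4 → ¬ soundL i <+: w.toList) :
    solForA (([0,1,2,3] : List Int).drop j) d w p = (d, w, p) := by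
  match j, h with
  | 0, h =>
    rw [show ([0,1,2,3] : List Int).drop 0 = [0,1,2,3] from rfl,
      forA_skip _ _ _ _ _ (fun hc => h 0 (by omega) (by omega) ((test0_iff w).1 hc)),
      forA_skip _ _ _ _ _ (fun hc => h 1 (by omega) (by omega) ((test1_iff w).1 hc)),
      forA_skip _ _ _ _ _ (fun hc => h 2 (by omega) (by omega) ((test2_iff w).1 hc)),
      forA_skip _ _ _ _ _ (fun hc => h 3 (by omega) (by omega) ((test3_iff w).1 hc))]
    rfl
  | 1, h =>
    rw [show ([0,1,2,3] : List Int).drop 1 = [1,2,3] from rfl,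
      forA_skip _ _ _ _ _ (fun hc => h 1 (by omega) (by omega) ((test1_iff w).1 hc)),
      forA_skip _ _ _ _ _ (fun hc => h 2 (by omega) (by omega) ((test2_iff w).1 hc)),
      forA_skip _ _ _ _ _ (fun hc => h 3 (by omega) (by omega) ((test3_iff w).1 hc))]
    rfl
  | 2, h =>
    rw [show ([0,1,2,3] : List Int).drop 2 = [2,3] from rfl,
      forA_skip _ _ _ _ _ (fun hc => h 2 (by omega) (by omega) ((test2_iff w).1 hc)),
      forA_skip _ _ _ _ _ (fun hc => h 3 (by omega) (by omega) ((test3_iff w).1 hc))]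
    rfl
  | 3, h =>
    rw [show ([0,1,2,3] : List Int).drop 3 = [3] from rfl,
      forA_skip _ _ _ _ _ (fun hc => h 3 (by omega) (by omega) ((test3_iff w).1 hc))]
    rfl
  | (k+4), h =>
    rw [List.drop_eq_nil_of_le (by simp)]
    rfl

-- one pass of A's inner for loop: the matching sound equals previous → break, state unchanged
lemma forA_pass_break (w : String) (p : Int) (d : Bool) (j m : Nat) (r : List Char)
    (hmu : mu w.toList = some (m, r)) (hjm : j ≤ m) (hmp : (m : Int) = p) :
    solForA (([0,1,2,3] : List Int).drop j) d w p = (d, w, p) := by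
  obtain ⟨hm4, hpre, hr, hoth⟩ := mu_some_facts hmu
  have skip : ∀ i : Nat, i < 4 → i ≠ m →
      ¬ PySem.Str.find w (PySem.List.pyGetD canPronounce (i : Int) "") = 0 := by
    intro i hi hne hc
    have : soundL i <+: w.toList := by
      interval_cases i
      · exact (test0_iff w).1 hc
      · exact (test1_iff w).1 hc
      · exact (test2_iff w).1 hc
      · exact (test3_iff w).1 hc
    exact hoth i hi hne this
  have hit : PySem.Str.find w (PySem.List.pyGetD canPronounce (m : Int) "") = 0 := by
    interval_cases m
    · exact (test0_iff w).2 hpre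
    · exact (test1_iff w).2 hpre
    · exact (test2_iff w).2 hpre
    · exact (test3_iff w).2 hpre
  interval_cases m <;> interval_cases j <;>
    simp only [List.drop, Nat.cast_ofNat, Nat.cast_zero, Nat.cast_one] <;>
    (try rw [forA_skip (0 : Int) _ _ _ _ (by exact_mod_cast skip 0 (by omega) (by omega))]) <;>
    (try rw [forA_skip (1 : Int) _ _ _ _ (by exact_mod_cast skip 1 (by omega) (by omega))]) <;>
    (try rw [forA_skip (2 : Int) _ _ _ _ (by exact_mod_cast skip 2 (by omega) (by omega))]) <;>
    exact forA_hit_eq _ _ _ _ _ (by exact_mod_cast hit) (by exact_mod_cast hmp)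

-- one pass of A's inner for loop: a new sound matches → strip it and continue the pass
set_option maxHeartbeats 1000000 in
lemma forA_pass_strip (w : String) (p : Int) (d : Bool) (j m : Nat) (r : List Char)
    (hmu : mu w.toList = some (m, r)) (hjm : j ≤ m) (hmp : (m : Int) ≠ p) :
    ∃ w' : String, w'.toList = r ∧
      solForA (([0,1,2,3] : List Int).drop j) d w p =
        solForA (([0,1,2,3] : List Int).drop (m+1)) false w' (m : Int) := by
  obtain ⟨hm4, hpre, hr, hoth⟩ := mu_some_facts hmu
  have skip : ∀ i : Nat, i < 4 → i ≠ m →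
      ¬ PySem.Str.find w (PySem.List.pyGetD canPronounce (i : Int) "") = 0 := by
    intro i hi hne hc
    have : soundL i <+: w.toList := by
      interval_cases i
      · exact (test0_iff w).1 hc
      · exact (test1_iff w).1 hc
      · exact (test2_iff w).1 hc
      · exact (test3_iff w).1 hc
    exact hoth i hi hne this
  have hit : PySem.Str.find w (PySem.List.pyGetD canPronounce (m : Int) "") = 0 := by
    interval_cases m
    · exact (test0_iff w).2 hpre
    · exact (test1_iff w).2 hpre
    · exact (test2_iff w).2 hpre
    · exact (test3_iff w).2 hpre
  refine ⟨PySem.Str.slice w (some (PySem.Str.len (PySem.List.pyGetD canPronounce (m : Int) ""))) none, ?_, ?_⟩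
  · interval_cases m
    · have e : PySem.Str.len (PySem.List.pyGetD canPronounce ((0:Nat) : Int) "") = ((3:Nat) : Int) := by decide
      rw [e, slice_drop, hr]; rfl
    · have e : PySem.Str.len (PySem.List.pyGetD canPronounce ((1:Nat) : Int) "") = ((2:Nat) : Int) := by decide
      rw [e, slice_drop, hr]; rfl
    · have e : PySem.Str.len (PySem.List.pyGetD canPronounce ((2:Nat) : Int) "") = ((3:Nat) : Int) := by decide
      rw [e, slice_drop, hr]; rfl
    · have e : PySem.Str.len (PySem.List.pyGetD canPronounce ((3:Nat) : Int) "") = ((2:Nat) : Int) := by decide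
      rw [e, slice_drop, hr]; rfl
  · have k0 : ∀ (rest : List Int) (d : Bool) (p : Int), m ≠ 0 →
        solForA ((0:Int) :: rest) d w p = solForA rest d w p :=
      fun rest d p hm => forA_skip _ _ _ _ _ (by exact_mod_cast skip 0 (by omega) (Ne.symm hm))
    have k1 : ∀ (rest : List Int) (d : Bool) (p : Int), m ≠ 1 →
        solForA ((1:Int) :: rest) d w p = solForA rest d w p :=
      fun rest d p hm => forA_skip _ _ _ _ _ (by exact_mod_cast skip 1 (by omega) (Ne.symm hm))
    have k2 : ∀ (rest : List Int) (d : Bool) (p : Int), m ≠ 2 →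
        solForA ((2:Int) :: rest) d w p = solForA rest d w p :=
      fun rest d p hm => forA_skip _ _ _ _ _ (by exact_mod_cast skip 2 (by omega) (Ne.symm hm))
    interval_cases m
    · interval_cases j
      · exact forA_hit_ne _ _ _ _ _ (by exact_mod_cast hit) (by exact_mod_cast hmp)
    · interval_cases j <;> (try rw [show ([0,1,2,3] : List Int).drop 0 = [0,1,2,3] from rfl, k0 _ _ _ (by omega)]) <;>
        exact forA_hit_ne _ _ _ _ _ (by exact_mod_cast hit) (by exact_mod_cast hmp)
    · interval_cases j <;> (try rw [show ([0,1,2,3] : List Int).drop 0 = [0,1,2,3] from rfl, k0 _ _ _ (by omega)]) <;>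
        (try rw [show ([0,1,2,3] : List Int).drop 1 = [1,2,3] from rfl]) <;>
        (try rw [k1 _ _ _ (by omega)]) <;>
        exact forA_hit_ne _ _ _ _ _ (by exact_mod_cast hit) (by exact_mod_cast hmp)
    · interval_cases j <;> (try rw [show ([0,1,2,3] : List Int).drop 0 = [0,1,2,3] from rfl, k0 _ _ _ (by omega)]) <;>
        (try rw [show ([0,1,2,3] : List Int).drop 1 = [1,2,3] from rfl]) <;>
        (try rw [k1 _ _ _ (by omega)]) <;>
        (try rw [show ([0,1,2,3] : List Int).drop 2 = [2,3] from rfl]) <;>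
        (try rw [k2 _ _ _ (by omega)]) <;>
        exact forA_hit_ne _ _ _ _ _ (by exact_mod_cast hit) (by exact_mod_cast hmp)

lemma solWhileA_stop (f : Nat) (w : String) (p : Int) (h : w.toList = []) :
    solWhileA f w p = w := by
  cases f with
  | zero => rfl
  | succ f => simp [solWhileA, h]

lemma pyRange04 : PySem.List.pyRange 0 4 1 = (([0,1,2,3] : List Int).drop 0) := by decide

-- A's while loop computes exactly the sequential residual (with enough fuel);
-- part 2 is the mid-pass continuation after a strip at index j-1
lemma main_ab (n : Nat) :
    (∀ (w : String) (p : Int) (f : Nat), w.toList.length ≤ n → w.toList.length < f →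
      (solWhileA f w p).toList = seqRes w.toList p) ∧
    (∀ (w : String) (p : Int) (f : Nat) (j : Nat), w.toList.length ≤ n → w.toList.length + 1 < f →
      (solWhileA f (solForA (([0,1,2,3] : List Int).drop j) false w p).2.1
        (solForA (([0,1,2,3] : List Int).drop j) false w p).2.2).toList = seqRes w.toList p) := by
  induction n using Nat.strong_induction_on with
  | _ n IH =>
  have ha : ∀ (w : String) (p : Int) (f : Nat), w.toList.length ≤ n → w.toList.length < f →
      (solWhileA f w p).toList = seqRes w.toList p := by
    intro w p f hn hf
    obtain ⟨f', rfl⟩ : ∃ f', f = f' + 1 := ⟨f - 1, by omega⟩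
    by_cases hw : w.toList = []
    · rw [solWhileA_stop _ _ _ hw, hw, seqRes_none p mu_nil]
    · have hpos : 0 < PySem.Str.len w := by
        have : w.toList.length ≠ 0 := by simpa using hw
        simp only [PySem.Str.len_eq, PySem.Chars.len_eq]
        omega
      simp only [solWhileA]
      rw [if_pos hpos, pyRange04]
      cases hmu : mu w.toList with
      | none =>
        rw [forA_pass_stop w p true 0 (fun i _ hi4 => mu_none_facts hmu i hi4)]
        simp [seqRes_none p hmu]
      | some mr =>
        obtain ⟨m, r⟩ := mr
        by_cases hmp : (m : Int) = p
        · rw [forA_pass_break w p true 0 m r hmu (by omega) hmp]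
          simp [seqRes_some p hmu, hmp]
        · obtain ⟨w', hw', heq⟩ := forA_pass_strip w p true 0 m r hmu (by omega) hmp
          rw [heq]
          have hlen2 := mu_some_len hmu
          have h1 : (solForA (([0,1,2,3] : List Int).drop (m+1)) false w' (m : Int)).1 = false :=
            forA_fst_false _ _ _
          simp only [h1, Bool.false_eq_true, if_false]
          have hwlen : w.toList.length ≥ 1 := by
            cases hcs : w.toList with
            | nil => exact absurd hcs hw
            | cons a t => simp [hcs]
          have hb' := (IH (n-1) (by omega)).2 w' (m : Int) f' (m+1)
            (by rw [hw']; omega) (by rw [hw']; omega)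
          rw [hb', hw', seqRes_some p hmu, if_neg hmp]
  have hb : ∀ (w : String) (p : Int) (f : Nat) (j : Nat), w.toList.length ≤ n →
      w.toList.length + 1 < f →
      (solWhileA f (solForA (([0,1,2,3] : List Int).drop j) false w p).2.1
        (solForA (([0,1,2,3] : List Int).drop j) false w p).2.2).toList = seqRes w.toList p := by
    intro w p f j hn hf
    cases hmu : mu w.toList with
    | none =>
      rw [forA_pass_stop w p false j (fun i _ hi4 => mu_none_facts hmu i hi4)]
      exact ha w p f hn (by omega)
    | some mr =>
      obtain ⟨m, r⟩ := mr
      by_cases hjm : j ≤ m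
      · by_cases hmp : (m : Int) = p
        · rw [forA_pass_break w p false j m r hmu hjm hmp]
          exact ha w p f hn (by omega)
        · obtain ⟨w', hw', heq⟩ := forA_pass_strip w p false j m r hmu hjm hmp
          rw [heq]
          have hlen2 := mu_some_len hmu
          have hwlen : 2 ≤ w.toList.length := by omega
          have hb' := (IH (n-1) (by omega)).2 w' (m : Int) f (m+1)
            (by rw [hw']; omega) (by rw [hw']; omega)
          rw [hb', hw', seqRes_some p hmu, if_neg hmp]
      · obtain ⟨hm4, hpre, hr, hoth⟩ := mu_some_facts hmu
        rw [forA_pass_stop w p false j (fun i hji hi4 => hoth i hi4 (by omega))]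
        exact ha w p f hn (by omega)
  exact ⟨ha, hb⟩

lemma whileA_eq (w : String) (p : Int) :
    (solWhileA (w.toList.length + 1) w p).toList = seqRes w.toList p :=
  (main_ab w.toList.length).1 w p _ le_rfl (by omega)

-- B-side: the 'last' string that corresponds to a previous-index p
def sOfI (p : Int) : String :=
  if p = 0 then "aya" else if p = 1 then "ye" else if p = 2 then "woo" else if p = 3 then "ma" else ""

lemma sOfI_coe (m : Nat) (hm : m < 4) : sOfI (m : Int) = soundS m := by
  interval_cases m <;> decide

lemma sOf_ne (m : Nat) (hm : m < 4) (p : Int) (hp : p = -1 ∨ (0 ≤ p ∧ p < 4))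
    (hne : (m : Int) ≠ p) : sOfI p ≠ soundS m := by
  rcases hp with rfl | ⟨hp0, hp4⟩
  · interval_cases m <;> decide
  · interval_cases p <;> interval_cases m <;> first | decide | simp at hne

-- the concrete dictionary lookup
lemma soundsD_getD (c : Char) : PySem.Dict.getD soundsD c "" =
    (if c = 'm' then "ma" else if c = 'w' then "woo" else if c = 'y' then "ye"
      else if c = 'a' then "aya" else "") := by
  show PySem.Dict.getD ((((PySem.Dict.empty.insert 'a' "aya").insert 'y' "ye").insert 'w'
    "woo").insert 'm' "ma") c "" = _
  rw [PySem.Dict.getD_insert, PySem.Dict.getD_insert, PySem.Dict.getD_insert,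
    PySem.Dict.getD_insert, PySem.Dict.getD_empty]

-- consuming one full sound at a token boundary (last ≠ that sound)
lemma bScan_sound (m : Nat) (hm : m < 4) (rest : List Char) (last cur : String)
    (hlast : last ≠ soundS m) :
    bScan (soundL m ++ rest) last cur 0 = bScan rest (soundS m) (soundS m) 0 := by
  interval_cases m
  · have h0 : ¬ ("aya" = last) := fun h => hlast h.symm
    simp [bScan, soundL, soundS, soundsD_getD, h0, PySem.Str.pyGet?]
  · have h0 : ¬ ("ye" = last) := fun h => hlast h.symm
    simp [bScan, soundL, soundS, soundsD_getD, h0, PySem.Str.pyGet?]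
  · have h0 : ¬ ("woo" = last) := fun h => hlast h.symm
    simp [bScan, soundL, soundS, soundsD_getD, h0, PySem.Str.pyGet?]
  · have h0 : ¬ ("ma" = last) := fun h => hlast h.symm
    simp [bScan, soundL, soundS, soundsD_getD, h0, PySem.Str.pyGet?]

-- a repeated sound at a token boundary breaks immediately
lemma bScan_repeat (m : Nat) (hm : m < 4) (rest : List Char) (cur : String) :
    (bScan (soundL m ++ rest) (soundS m) cur 0).1 = false := by
  interval_cases m <;> simp [bScan, soundL, soundS, soundsD_getD]

-- a nonempty word no sound is a prefix of is rejected by the automaton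
lemma bScan_noPrefix (cs : List Char) (last cur : String) (hne : cs ≠ [])
    (h : ∀ i, i < 4 → ¬ soundL i <+: cs) :
    ¬ ((bScan cs last cur 0).1 = true ∧ (bScan cs last cur 0).2.2.2 = 0) := by
  obtain ⟨c, t, rfl⟩ : ∃ c t, cs = c :: t := by
    cases cs with
    | nil => exact absurd rfl hne
    | cons c t => exact ⟨c, t, rfl⟩
  by_cases hca : c = 'a'
  · subst hca
    have hp0 : ¬ (['y','a'] <+: t) := fun hp => h 0 (by omega) (by simpa [soundL] using hp)
    by_cases hl : last = "aya"
    · simp [bScan, soundsD_getD, hl]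
    · rcases t with _ | ⟨d, u⟩
      · simp [bScan, soundsD_getD, Ne.symm hl, PySem.Str.pyGet?]
      · by_cases hdy : d = 'y'
        · subst hdy
          rcases u with _ | ⟨e, v⟩
          · simp [bScan, soundsD_getD, Ne.symm hl, PySem.Str.pyGet?]
          · by_cases hea : e = 'a'
            · exact absurd (hea ▸ ⟨v, rfl⟩) hp0
            · simp [bScan, soundsD_getD, Ne.symm hl, PySem.Str.pyGet?, Ne.symm hea]
        · simp [bScan, soundsD_getD, Ne.symm hl, PySem.Str.pyGet?, Ne.symm hdy]
  · by_cases hcy : c = 'y'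
    · subst hcy
      have hp1 : ¬ (['e'] <+: t) := fun hp => h 1 (by omega) (by simpa [soundL] using hp)
      by_cases hl : last = "ye"
      · simp [bScan, soundsD_getD, hl]
      · rcases t with _ | ⟨d, u⟩
        · simp [bScan, soundsD_getD, Ne.symm hl, PySem.Str.pyGet?]
        · by_cases hde : d = 'e'
          · exact absurd (hde ▸ ⟨u, rfl⟩) hp1
          · simp [bScan, soundsD_getD, Ne.symm hl, PySem.Str.pyGet?, Ne.symm hde]
    · by_cases hcw : c = 'w'
      · subst hcw
        have hp2 : ¬ (['o','o'] <+: t) := fun hp => h 2 (by omega) (by simpa [soundL] using hp)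
        by_cases hl : last = "woo"
        · simp [bScan, soundsD_getD, hl]
        · rcases t with _ | ⟨d, u⟩
          · simp [bScan, soundsD_getD, Ne.symm hl, PySem.Str.pyGet?]
          · by_cases hdo : d = 'o'
            · subst hdo
              rcases u with _ | ⟨e, v⟩
              · simp [bScan, soundsD_getD, Ne.symm hl, PySem.Str.pyGet?]
              · by_cases heo : e = 'o'
                · exact absurd (heo ▸ ⟨v, rfl⟩) hp2
                · simp [bScan, soundsD_getD, Ne.symm hl, PySem.Str.pyGet?, Ne.symm heo]
            · simp [bScan, soundsD_getD, Ne.symm hl, PySem.Str.pyGet?, Ne.symm hdo]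
      · by_cases hcm : c = 'm'
        · subst hcm
          have hp3 : ¬ (['a'] <+: t) := fun hp => h 3 (by omega) (by simpa [soundL] using hp)
          by_cases hl : last = "ma"
          · simp [bScan, soundsD_getD, hl]
          · rcases t with _ | ⟨d, u⟩
            · simp [bScan, soundsD_getD, Ne.symm hl, PySem.Str.pyGet?]
            · by_cases hda : d = 'a'
              · exact absurd (hda ▸ ⟨u, rfl⟩) hp3
              · simp [bScan, soundsD_getD, Ne.symm hl, PySem.Str.pyGet?, Ne.symm hda]
        · simp [bScan, soundsD_getD, hca, hcy, hcw, hcm]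

-- the automaton accepts from a boundary state exactly when A's sequential residual is empty
lemma bmain (n : Nat) : ∀ (cs : List Char), cs.length ≤ n → ∀ (p : Int) (cur : String),
    (p = -1 ∨ (0 ≤ p ∧ p < 4)) →
    (((bScan cs (sOfI p) cur 0).1 = true ∧ (bScan cs (sOfI p) cur 0).2.2.2 = 0) ↔
      seqRes cs p = []) := by
  induction n using Nat.strong_induction_on with
  | _ n IH =>
  intro cs hn p cur hp
  by_cases hcs : cs = []
  · subst hcs
    simp [bScan, seqRes_none p mu_nil]
  · cases hmu : mu cs with
    | none =>
      rw [seqRes_none p hmu]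
      constructor
      · intro h
        exact absurd h (bScan_noPrefix cs (sOfI p) cur hcs (mu_none_facts hmu))
      · intro h; exact absurd h hcs
    | some mr =>
      obtain ⟨m, r⟩ := mr
      obtain ⟨hm4, hpre, hr, _⟩ := mu_some_facts hmu
      obtain ⟨rest, hsplit⟩ := hpre
      have hrest : rest = r := by
        rw [hr, ← hsplit, List.drop_left]
      have hlen2 := mu_some_len hmu
      by_cases hmp : (m : Int) = p
      · have hl : sOfI p = soundS m := by rw [← hmp, sOfI_coe m hm4]
        rw [seqRes_some p hmu, if_pos hmp]
        constructor
        · intro h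
          have := bScan_repeat m hm4 rest cur
          rw [← hsplit, hl] at h
          rw [h.1] at this
          exact absurd this (by simp)
        · intro h; exact absurd h hcs
      · have hne : sOfI p ≠ soundS m := sOf_ne m hm4 p hp hmp
        rw [seqRes_some p hmu, if_neg hmp, ← hrest]
        rw [← hsplit, bScan_sound m hm4 rest (sOfI p) cur hne]
        have ih := IH (n - 1) (by omega) rest (by rw [hrest]; omega) (m : Int) (soundS m)
          (Or.inr ⟨by omega, by exact_mod_cast hm4⟩)
        rw [sOfI_coe m hm4] at ih
        exact ih

-- per-word equivalence of the two counting conditions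
lemma perword (w : String) :
    ((PySem.Str.len (solWhileA (w.toList.length + 1) w (-1)) = 0) ↔
      ((bScan w.toList "" "" 0).1 = true ∧ (bScan w.toList "" "" 0).2.2.2 = 0)) := by
  have hA : (PySem.Str.len (solWhileA (w.toList.length + 1) w (-1)) = 0) ↔
      seqRes w.toList (-1) = [] := by
    rw [← whileA_eq w (-1)]
    simp only [PySem.Str.len_eq]
    constructor
    · intro h; exact List.length_eq_zero_iff.1 (by exact_mod_cast h)
    · intro h; rw [h]; rfl
  have hB := bmain w.toList.length w.toList le_rfl (-1) "" (Or.inl rfl)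
  rw [hA, ← hB]
  rfl

-- the two per-word counting steps agree, so the folds agree
lemma foldl_eq_aux (l : List String) : ∀ acc : Int,
    l.foldl (fun answer word =>
      let word' := solWhileA (word.toList.length + 1) word (-1)
      if PySem.Str.len word' = 0 then answer + 1 else answer) acc =
    l.foldl (fun answer word =>
      let t := bScan word.toList "" "" 0
      if t.1 = true ∧ t.2.2.2 = 0 then answer + 1 else answer) acc := by
  induction l with
  | nil => intro acc; rfl
  | cons w l ih =>
    intro acc
    simp only [List.foldl_cons]
    rw [ih]
    congr 1
    show (if PySem.Str.len (solWhileA (w.toList.length + 1) w (-1)) = 0 then acc + 1 else acc) =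
      (if (bScan w.toList "" "" 0).1 = true ∧ (bScan w.toList "" "" 0).2.2.2 = 0
        then acc + 1 else acc)
    by_cases h : PySem.Str.len (solWhileA (w.toList.length + 1) w (-1)) = 0
    · rw [if_pos h, if_pos ((perword w).1 h)]
    · rw [if_neg h, if_neg (fun hc => h ((perword w).2 hc))]

-- ===== VERDICT (by name: the statement is the Claim_ definition above) =====
theorem solution_spec : Claim_equal_solution := by
  intro babbling _
  unfold Spec_solution solution solution_alt
  exact foldl_eq_aux babbling 0
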